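-- pv_equiv track=rewrite | github.com/Patrycja1311/Codewars | kata_7kyu/oring_arrays/oring_arrays.py | or_arrays
-- ===== SOURCE A (Python) =====
-- def or_arrays(arr1, arr2, default=0):
--     length = max(len(arr1), len(arr2))
--     result = []
--     for i in range(length):
--         a = arr1[i] if i < len(arr1) else default
--         b = arr2[i] if i < len(arr2) else default
--         result.append(a | b)
--     return result
-- ===== SOURCE B (Python) =====
-- def or_arrays(arr1, arr2, default=0):
--     # OR the overlapping prefix pairwise, then OR the leftover tail with default.
--     head = [a | b for a, b in zip(arr1, arr2)]
--     tail = arr1[len(arr2):] if len(arr1) > len(arr2) else arr2[len(arr1):]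
--     return head + [x | default for x in tail]
-- ===== Notes on version B (the rewrite author's own statement) =====
-- stated objective: idiomatic
-- what changed: Replaces the max-length index loop with bounds checks by a zip over the common prefix plus a slice of the longer array's leftover tail OR'd with the default.
import Mathlib
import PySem

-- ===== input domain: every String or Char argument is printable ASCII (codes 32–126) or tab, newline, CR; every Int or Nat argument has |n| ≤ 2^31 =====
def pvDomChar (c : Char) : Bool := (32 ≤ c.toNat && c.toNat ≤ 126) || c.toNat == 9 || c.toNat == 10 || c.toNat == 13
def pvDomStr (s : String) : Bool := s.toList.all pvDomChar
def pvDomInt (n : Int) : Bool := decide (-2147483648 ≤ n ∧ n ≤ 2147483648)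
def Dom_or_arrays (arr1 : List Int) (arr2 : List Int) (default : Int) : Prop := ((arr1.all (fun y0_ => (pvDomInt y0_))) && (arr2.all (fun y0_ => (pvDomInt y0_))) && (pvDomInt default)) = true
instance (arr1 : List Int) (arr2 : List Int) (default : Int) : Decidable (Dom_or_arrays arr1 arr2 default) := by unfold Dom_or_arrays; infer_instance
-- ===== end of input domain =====

-- B replaces A's max-length index loop with bounds checks by a zip over the common
-- prefix plus the longer array's leftover slice OR'd with the default (idiomatic, same cost).

-- ===== PORT A =====
def or_arrays (arr1 : List Int) (arr2 : List Int) (default : Int) : List Int :=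
  let length : Int := max (arr1.length : Int) (arr2.length : Int)
  (PySem.List.pyRange 0 length 1).foldl (fun result i =>
    let a := if i < (arr1.length : Int) then PySem.List.pyGetD arr1 i default else default
    let b := if i < (arr2.length : Int) then PySem.List.pyGetD arr2 i default else default
    result ++ [PySem.Int.bor a b]) []

-- ===== PORT B =====
def or_arrays_alt (arr1 : List Int) (arr2 : List Int) (default : Int) : List Int :=
  let head := List.zipWith (fun a b => PySem.Int.bor a b) arr1 arr2
  let tail := if arr1.length > arr2.length then arr1.drop arr2.length else arr2.drop arr1.length
  head ++ tail.map (fun x => PySem.Int.bor x default)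

-- ===== PRECONDITION & SPEC =====
def Spec_or_arrays (arr1 : List Int) (arr2 : List Int) (default : Int) (out : List Int) : Prop := out = or_arrays_alt arr1 arr2 default
instance (arr1 : List Int) (arr2 : List Int) (default : Int) (out : List Int) : Decidable (Spec_or_arrays arr1 arr2 default out) := by unfold Spec_or_arrays; infer_instance

-- ===== CLAIM (what is proved, stated in full; the proofs are below) =====
def Claim_equal_or_arrays : Prop := ∀ (arr1 : List Int) (arr2 : List Int) (default : Int), Dom_or_arrays arr1 arr2 default → Spec_or_arrays arr1 arr2 default (or_arrays arr1 arr2 default)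

-- ===== LEMMAS AND PROOFS =====

-- Applying f to the k-th element over range(len) is just map f.
theorem map_range_getD (l : List Int) (f : Int → Int) (d : Int) :
    (List.range l.length).map (fun k => f (l.getD k d)) = l.map f := by
  induction l with
  | nil => simp
  | cons x xs ih =>
    simp only [List.length_cons, List.range_succ_eq_map, List.map_cons, List.map_map]
    exact congrArg (f x :: ·) ih

theorem or_arrays_alt_cons (a b d : Int) (as bs : List Int) :
    or_arrays_alt (a :: as) (b :: bs) d = PySem.Int.bor a b :: or_arrays_alt as bs d := by
  simp only [or_arrays_alt, List.zipWith_cons_cons, List.length_cons, List.drop_succ_cons,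
    gt_iff_lt, Nat.add_lt_add_iff_right, List.cons_append]

theorem or_arrays_alt_eq_map (arr1 arr2 : List Int) (d : Int) :
    or_arrays_alt arr1 arr2 d =
      (List.range (max arr1.length arr2.length)).map
        (fun k => PySem.Int.bor (arr1.getD k d) (arr2.getD k d)) := by
  induction arr1 generalizing arr2 with
  | nil =>
    simp only [or_arrays_alt, List.zipWith_nil_left, List.length_nil, List.drop_zero,
      gt_iff_lt, Nat.not_lt_zero, if_false, List.nil_append, Nat.zero_max, List.getD_nil]
    rw [← map_range_getD arr2 (fun x => PySem.Int.bor x d) d]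
    exact List.map_congr_left (fun k _ => PySem.Int.bor_comm _ _)
  | cons a as ih =>
    cases arr2 with
    | nil =>
      simp only [or_arrays_alt, List.zipWith_nil_right, List.length_nil, List.length_cons,
        gt_iff_lt, Nat.succ_pos, if_true, List.drop_zero, List.nil_append, Nat.max_zero,
        List.getD_nil]
      exact (map_range_getD (a :: as) (fun x => PySem.Int.bor x d) d).symm
    | cons b bs =>
      rw [or_arrays_alt_cons, ih bs]
      simp [Nat.succ_max_succ, List.range_succ_eq_map, List.map_map, Function.comp_def]

theorem or_arrays_eq_map (arr1 arr2 : List Int) (d : Int) :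
    or_arrays arr1 arr2 d =
      (List.range (max arr1.length arr2.length)).map
        (fun k => PySem.Int.bor (arr1.getD k d) (arr2.getD k d)) := by
  unfold or_arrays
  rw [PySem.List.foldl_append_singleton_eq_map, List.nil_append, PySem.List.pyRange_one,
    List.map_map]
  have hn : ((max (arr1.length : Int) (arr2.length : Int)) - 0).toNat
      = max arr1.length arr2.length := by omega
  rw [hn]
  refine List.map_congr_left (fun k hk => ?_)
  simp only [Function.comp_apply, Int.zero_add, PySem.List.pyGetD_natCast]
  congr 1
  · split_ifs with h
    · rfl
    · rw [List.getD_eq_default _ _ (by omega)]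
  · split_ifs with h
    · rfl
    · rw [List.getD_eq_default _ _ (by omega)]

-- ===== VERDICT (by name: the statement is the Claim_ definition above) =====
theorem or_arrays_spec : Claim_equal_or_arrays := by
  intro arr1 arr2 d _
  unfold Spec_or_arrays
  rw [or_arrays_eq_map, or_arrays_alt_eq_map]
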